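-- pv_equiv track=rewrite | github.com/thyeem/paintshop | answer.py | evalute_result
-- ===== SOURCE A (Python) =====
-- def evalute_result(result, nth, num_colors):
--     output = f'Case #{nth}: '
--     if not result:
--         output += 'IMPOSSIBLE'
--     else:
--         matte = [ '1' if (i, 1) in result else '0' for i in range(1, num_colors+1) ]
--         output += ' '.join(matte)
--     return output
-- ===== SOURCE B (Python) =====
-- def evalute_result(result, nth, num_colors):
--     if not result:
--         return f'Case #{nth}: IMPOSSIBLE'
--     bits = ['0'] * max(num_colors, 0)
--     for c, f in result:
--         if f == 1 and 1 <= c <= num_colors: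
--             bits[c - 1] = '1'
--     return f'Case #{nth}: ' + ' '.join(bits)
-- ===== Notes on version B (the rewrite author's own statement) =====
-- stated objective: alternative
-- what changed: B replaces A's per-color membership scan of result (a comprehension testing (i,1) in result for every color) by a table fill: allocate a '0'-filled bit table, make one pass over result marking bits[c-1] for matte entries in range, then join the table once.
import Mathlib
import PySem

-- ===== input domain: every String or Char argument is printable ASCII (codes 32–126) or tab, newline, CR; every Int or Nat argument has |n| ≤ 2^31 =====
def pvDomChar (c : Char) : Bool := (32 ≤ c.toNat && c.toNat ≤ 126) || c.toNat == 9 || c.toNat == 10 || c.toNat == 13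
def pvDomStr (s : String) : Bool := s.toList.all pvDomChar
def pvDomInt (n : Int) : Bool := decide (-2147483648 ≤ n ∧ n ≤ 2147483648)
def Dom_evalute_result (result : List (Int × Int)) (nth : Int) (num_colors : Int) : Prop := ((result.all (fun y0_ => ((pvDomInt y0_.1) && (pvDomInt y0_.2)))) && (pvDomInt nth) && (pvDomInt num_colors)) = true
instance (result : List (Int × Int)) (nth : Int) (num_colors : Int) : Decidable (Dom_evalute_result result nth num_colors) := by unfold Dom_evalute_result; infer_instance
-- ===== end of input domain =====

-- B replaces A's per-color membership scan of result by one table fill: a '0'-filled bit table,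
-- one pass over result marking matte colors, then a single join (alternative decomposition).

-- ===== PORT A =====
def evalute_result (result : List (Int × Int)) (nth : Int) (num_colors : Int) : String :=
  let output := "Case #" ++ PySem.Int.toStr nth ++ ": "
  if result = [] then
    output ++ "IMPOSSIBLE"
  else
    let matte := (PySem.List.pyRange 1 (num_colors + 1) 1).map
      (fun i => if (i, (1 : Int)) ∈ result then "1" else "0")
    output ++ PySem.Str.join " " matte

-- ===== PORT B =====
def evalute_result_alt (result : List (Int × Int)) (nth : Int) (num_colors : Int) : String :=
  if result = [] then
    "Case #" ++ PySem.Int.toStr nth ++ ": IMPOSSIBLE"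
  else
    let bits0 := List.replicate (max num_colors 0).toNat "0"
    let bits := result.foldl
      (fun bs p =>
        if p.2 = 1 ∧ 1 ≤ p.1 ∧ p.1 ≤ num_colors then bs.set (p.1 - 1).toNat "1" else bs)
      bits0
    "Case #" ++ PySem.Int.toStr nth ++ ": " ++ PySem.Str.join " " bits

-- ===== PRECONDITION & SPEC =====
def Spec_evalute_result (result : List (Int × Int)) (nth : Int) (num_colors : Int) (out : String) : Prop := out = evalute_result_alt result nth num_colors
instance (result : List (Int × Int)) (nth : Int) (num_colors : Int) (out : String) : Decidable (Spec_evalute_result result nth num_colors out) := by unfold Spec_evalute_result; infer_instance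

-- ===== CLAIM (what is proved, stated in full; the proofs are below) =====
def Claim_equal_evalute_result : Prop := ∀ (result : List (Int × Int)) (nth : Int) (num_colors : Int), Dom_evalute_result result nth num_colors → Spec_evalute_result result nth num_colors (evalute_result result nth num_colors)

-- ===== LEMMAS AND PROOFS =====

-- the fold preserves the table's length
theorem fold_length (nc : Int) (l : List (Int × Int)) (bs : List String) :
    (l.foldl
      (fun bs p =>
        if p.2 = 1 ∧ 1 ≤ p.1 ∧ p.1 ≤ nc then bs.set (p.1 - 1).toNat "1" else bs)
      bs).length = bs.length := by
  induction l generalizing bs with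
  | nil => rfl
  | cons p l ih =>
      simp only [List.foldl_cons]
      rw [ih]
      split_ifs <;> simp

-- entry j of the filled table records exactly whether (j+1, 1) occurs in l
theorem fold_get (nc : Int) (l : List (Int × Int)) (bs : List String) (j : Nat)
    (hj : j < bs.length) (hjc : (j : Int) < nc) :
    (l.foldl
      (fun bs p =>
        if p.2 = 1 ∧ 1 ≤ p.1 ∧ p.1 ≤ nc then bs.set (p.1 - 1).toNat "1" else bs)
      bs)[j]? = if ((j : Int) + 1, (1 : Int)) ∈ l then some "1" else bs[j]? := by
  induction l generalizing bs with
  | nil => simp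
  | cons p l ih =>
      obtain ⟨c, f⟩ := p
      simp only [List.foldl_cons]
      have hlen : (if f = 1 ∧ 1 ≤ c ∧ c ≤ nc then bs.set (c - 1).toNat "1" else bs).length = bs.length := by
        split_ifs <;> simp
      rw [ih _ (by omega)]
      by_cases hmem : ((j : Int) + 1, (1 : Int)) ∈ l
      · simp [hmem]
      · simp only [hmem, if_false, List.mem_cons, or_false]
        by_cases heq : ((j : Int) + 1, (1 : Int)) = (c, f)
        · obtain ⟨hc, hf⟩ := Prod.mk.injEq .. ▸ heq
          have hcond : f = 1 ∧ 1 ≤ c ∧ c ≤ nc := by omega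
          have hidx : (c - 1).toNat = j := by omega
          simp [heq, hcond, hidx, hj]
        · simp only [heq, if_false]
          split_ifs with hcond
          · have hne : (c - 1).toNat ≠ j := by
              intro h
              apply heq
              have : c = (j : Int) + 1 := by omega
              have : f = 1 := hcond.1
              simp_all
            rw [List.getElem?_set_ne hne]
          · rfl

-- A's matte list equals B's filled table
theorem matte_eq (result : List (Int × Int)) (nc : Int) :
    (PySem.List.pyRange 1 (nc + 1) 1).map
      (fun i => if (i, (1 : Int)) ∈ result then "1" else "0")
    = result.foldl
        (fun bs p =>
          if p.2 = 1 ∧ 1 ≤ p.1 ∧ p.1 ≤ nc then bs.set (p.1 - 1).toNat "1" else bs)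
        (List.replicate (max nc 0).toNat "0") := by
  have hN : (max nc 0).toNat = nc.toNat := by omega
  apply List.ext_getElem?
  intro j
  by_cases hj : j < nc.toNat
  · have hlen : (List.replicate (max nc 0).toNat "0").length = nc.toNat := by simp [hN]
    rw [fold_get nc result _ j (by omega) (by omega)]
    rw [PySem.List.pyRange_one]
    have hj' : j < ((nc + 1 - 1).toNat) := by omega
    rw [List.getElem?_map, List.getElem?_map, List.getElem?_range hj']
    have : (1 : Int) + j = (j : Int) + 1 := by ring
    simp only [Option.map_some, this]
    split_ifs with h
    · rfl
    · simp [hN, hj]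
  · have h1 : ((PySem.List.pyRange 1 (nc + 1) 1).map
        (fun i => if (i, (1 : Int)) ∈ result then "1" else "0")).length = nc.toNat := by
      rw [List.length_map, PySem.List.length_pyRange_one]; omega
    have h2 : (result.foldl
        (fun bs p =>
          if p.2 = 1 ∧ 1 ≤ p.1 ∧ p.1 ≤ nc then bs.set (p.1 - 1).toNat "1" else bs)
        (List.replicate (max nc 0).toNat "0")).length = nc.toNat := by
      rw [fold_length]; simp [hN]
    rw [List.getElem?_eq_none (by omega), List.getElem?_eq_none (by omega)]

-- ===== VERDICT (by name: the statement is the Claim_ definition above) =====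
theorem evalute_result_spec : Claim_equal_evalute_result := by
  intro result nth num_colors _
  unfold Spec_evalute_result evalute_result evalute_result_alt
  by_cases h : result = []
  · simp [h, String.append_assoc]
  · simp only [h, if_false, String.append_assoc]
    rw [matte_eq]
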